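-- pv_equiv track=rewrite | github.com/Epholys/sheNANDigans | src/nand/bits_utils.py | read_bits
-- ===== SOURCE A (Python) =====
-- from typing import List
--
-- def read_bits(data: List[int], n: int) -> int:
--     """Convert the first n bits from a list (integer of value 0 or 1) to an integer."""
--     if len(data) < n:
--         raise ValueError(
--             f"Not enough bits in data (of len {len(data)})"
--             f"to form an integer with {n} requested bits."
--         )
--     bits = [data.pop(0) for _ in range(n)]
--     return sum(bit << i for i, bit in enumerate(reversed(bits)))
-- ===== SOURCE B (Python) =====
-- from typing import List
--
-- def read_bits(data: List[int], n: int) -> int: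
--     """Convert the first n bits from a list (integer of value 0 or 1) to an integer."""
--     if len(data) < n:
--         raise ValueError(
--             f"Not enough bits in data (of len {len(data)})"
--             f"to form an integer with {n} requested bits."
--         )
--     value = 0
--     for _ in range(n):
--         value = value * 2 + data.pop(0)
--     return value
-- ===== Notes on version B (the rewrite author's own statement) =====
-- stated objective: idiomatic
-- what changed: Replaces A's materialized popped list, reversal and enumerate/shift generator-sum with a single Horner-style running accumulator (value = value*2 + data.pop(0)) threaded through one loop.
import Mathlib
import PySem

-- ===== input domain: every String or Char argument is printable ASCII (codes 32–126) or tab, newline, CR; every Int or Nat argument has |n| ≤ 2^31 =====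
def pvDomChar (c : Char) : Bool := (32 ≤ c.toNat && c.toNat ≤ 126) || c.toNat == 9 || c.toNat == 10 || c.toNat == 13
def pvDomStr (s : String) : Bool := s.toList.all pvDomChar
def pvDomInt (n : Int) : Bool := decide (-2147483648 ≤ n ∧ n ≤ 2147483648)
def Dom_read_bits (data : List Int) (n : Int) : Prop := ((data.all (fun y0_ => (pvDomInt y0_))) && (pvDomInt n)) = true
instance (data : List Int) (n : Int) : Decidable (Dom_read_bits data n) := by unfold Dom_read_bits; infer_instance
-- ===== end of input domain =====

-- B replaces A's reversed-list + per-position shift-sum with a single Horner-style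
-- multiply-add accumulator over the consumed prefix (objective: idiomatic/simpler).
-- Both A and B pop the first n elements of `data` in place; the equivalence proved
-- here is about the RETURN value (both perform the identical mutation).


-- ===== PORT A =====
-- `bits = [data.pop(0) for _ in range(n)]` takes the first n elements (n ≤ len under Pre_;
-- range(n) is empty for n < 0, matching `take 0`); `bit << i` with i ≥ 0 is `bit * 2^i`.
def read_bits (data : List Int) (n : Int) : Int :=
  if (data.length : Int) < n then 0  -- Python raises ValueError here (excluded by Pre_)
  else
    let bits := data.take n.toNat
    (PySem.List.enumerate bits.reverse 0).foldl (fun acc p => acc + p.2 * 2 ^ p.1.toNat) 0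

-- ===== PORT B =====
-- the `for _ in range(n): value = value * 2 + data.pop(0)` loop: k remaining iterations,
-- list front consumed one element per step
def hornerPop : List Int → Nat → Int → Int
  | _, 0, v => v
  | [], _ + 1, v => v
  | b :: rest, k + 1, v => hornerPop rest k (v * 2 + b)

def read_bits_alt (data : List Int) (n : Int) : Int :=
  if (data.length : Int) < n then 0  -- Python raises ValueError here (excluded by Pre_)
  else hornerPop data n.toNat 0

-- ===== PRECONDITION & SPEC =====
-- Pre_ excludes exactly the inputs where both Pythons raise ValueError (fewer than n bits).
def Pre_read_bits (data : List Int) (n : Int) : Prop := n ≤ (data.length : Int)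
instance (data : List Int) (n : Int) : Decidable (Pre_read_bits data n) := by unfold Pre_read_bits; infer_instance
def pvWitness_read_bits : List Int × Int := ([1, 0, 1], 2)
def Spec_read_bits (data : List Int) (n : Int) (out : Int) : Prop := out = read_bits_alt data n
instance (data : List Int) (n : Int) (out : Int) : Decidable (Spec_read_bits data n out) := by unfold Spec_read_bits; infer_instance

-- ===== CLAIM (what is proved, stated in full; the proofs are below) =====
def Claim_equal_read_bits : Prop := ∀ (data : List Int) (n : Int), Dom_read_bits data n → Pre_read_bits data n → Spec_read_bits data n (read_bits data n)

-- ===== LEMMAS AND PROOFS =====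

-- Σ l[i] * 2^i, structurally
def sumPow : List Int → Int
  | [] => 0
  | b :: t => b + 2 * sumPow t

theorem sumPow_append_singleton (l : List Int) (b : Int) :
    sumPow (l ++ [b]) = sumPow l + b * 2 ^ l.length := by
  induction l with
  | nil => simp [sumPow]
  | cons a t ih => simp [sumPow, ih]; ring

theorem enumerate_sum (l : List Int) (s : ℕ) :
    ((PySem.List.enumerate l (s : Int)).map (fun p => p.2 * 2 ^ p.1.toNat)).sum
      = 2 ^ s * sumPow l := by
  induction l generalizing s with
  | nil => simp [PySem.List.enumerate_nil, sumPow]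
  | cons b t ih =>
    rw [PySem.List.enumerate_cons]
    have : ((s : Int) + 1) = ((s + 1 : ℕ) : Int) := by push_cast; ring
    simp only [List.map_cons, List.sum_cons, this, ih, sumPow]
    simp [pow_succ]
    ring

theorem horner_eq (l : List Int) (v : Int) :
    l.foldl (fun v b => v * 2 + b) v = v * 2 ^ l.length + sumPow l.reverse := by
  induction l generalizing v with
  | nil => simp [sumPow]
  | cons b t ih =>
    simp only [List.foldl_cons, ih, List.reverse_cons, sumPow_append_singleton,
      List.length_reverse, List.length_cons]
    ring

theorem hornerPop_eq (l : List Int) (k : ℕ) (v : Int) :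
    hornerPop l k v = (l.take k).foldl (fun v b => v * 2 + b) v := by
  induction l generalizing k v with
  | nil => cases k <;> simp [hornerPop]
  | cons b t ih =>
    cases k with
    | zero => simp [hornerPop]
    | succ m => simp [hornerPop, ih]

-- ===== VERDICT (by name: the statement is the Claim_ definition above) =====
theorem read_bits_spec : Claim_equal_read_bits := by
  intro data n _ _
  unfold Spec_read_bits read_bits read_bits_alt
  split
  · rfl
  · rw [hornerPop_eq]
    have := enumerate_sum (data.take n.toNat).reverse 0
    rw [PySem.List.foldl_add (a := 0)
      (g := fun p : Int × Int => p.2 * 2 ^ p.1.toNat)]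
    simp only [Nat.cast_zero] at this
    rw [this, horner_eq]
    simp
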